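-- pv_equiv track=rewrite | github.com/chausette/computerCraft | radio/midi2rcm/midi2rcm.py | midi_note_to_noteblock
-- ===== SOURCE A (Python) =====
-- def midi_note_to_noteblock(midi_note: int) -> tuple:
--     """
--     Convertit une note MIDI (0-127) en note noteblock (0-24)
--     Retourne (pitch, octave_shift) où octave_shift indique si la note est hors range
--     """
--     # Noteblock range: F#3 (54) to F#5 (78) = 24 notes
--     # On centre sur cette plage
--     noteblock_base = 54  # F#3 en MIDI
--
--     # Ajuste la note dans la plage
--     adjusted_note = midi_note
--     octave_shift = 0
--
--     while adjusted_note < noteblock_base: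
--         adjusted_note += 12
--         octave_shift -= 1
--     while adjusted_note > noteblock_base + 24:
--         adjusted_note -= 12
--         octave_shift += 1
--
--     pitch = adjusted_note - noteblock_base
--     return (max(0, min(24, pitch)), octave_shift)
-- ===== SOURCE B (Python) =====
-- def midi_note_to_noteblock(midi_note: int) -> tuple:
--     """Closed-form octave shift instead of the two while loops."""
--     noteblock_base = 54
--     if midi_note < noteblock_base:
--         k = (noteblock_base - midi_note + 11) // 12
--         adjusted = midi_note + 12 * k
--         octave_shift = -k
--     elif midi_note > noteblock_base + 24:
--         k = (midi_note - (noteblock_base + 24) + 11) // 12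
--         adjusted = midi_note - 12 * k
--         octave_shift = k
--     else:
--         adjusted = midi_note
--         octave_shift = 0
--     pitch = adjusted - noteblock_base
--     return (max(0, min(24, pitch)), octave_shift)
-- ===== Notes on version B (the rewrite author's own statement) =====
-- stated objective: faster
-- what changed: Replaces the two while loops that step by 12 with a closed-form ceiling-division computation of the octave shift.
import Mathlib
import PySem

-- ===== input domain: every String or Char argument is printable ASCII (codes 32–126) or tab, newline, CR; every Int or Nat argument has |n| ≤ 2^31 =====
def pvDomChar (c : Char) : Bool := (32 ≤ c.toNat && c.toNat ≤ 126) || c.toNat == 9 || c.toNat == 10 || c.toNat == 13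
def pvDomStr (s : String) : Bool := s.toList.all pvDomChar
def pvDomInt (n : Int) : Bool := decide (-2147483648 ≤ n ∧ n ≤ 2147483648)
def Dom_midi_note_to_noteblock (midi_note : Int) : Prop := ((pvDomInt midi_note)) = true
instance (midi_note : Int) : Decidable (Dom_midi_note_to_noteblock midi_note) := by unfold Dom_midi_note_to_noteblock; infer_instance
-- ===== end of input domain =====

-- B replaces A's two step-by-12 while loops by a closed-form ceiling-division computation of the octave shift.

-- ===== PORT A =====
-- first while loop: while adjusted_note < 54: adjusted_note += 12; octave_shift -= 1
def pvLoopUp (adjusted_note octave_shift : Int) : Int × Int :=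
  if adjusted_note < 54 then pvLoopUp (adjusted_note + 12) (octave_shift - 1)
  else (adjusted_note, octave_shift)
termination_by (54 - adjusted_note).toNat
decreasing_by omega

-- second while loop: while adjusted_note > 54 + 24: adjusted_note -= 12; octave_shift += 1
def pvLoopDown (adjusted_note octave_shift : Int) : Int × Int :=
  if adjusted_note > 54 + 24 then pvLoopDown (adjusted_note - 12) (octave_shift + 1)
  else (adjusted_note, octave_shift)
termination_by (adjusted_note - 78).toNat
decreasing_by omega

def midi_note_to_noteblock (midi_note : Int) : Int × Int :=
  let noteblock_base : Int := 54
  let p1 := pvLoopUp midi_note 0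
  let p2 := pvLoopDown p1.1 p1.2
  let pitch := p2.1 - noteblock_base
  (max 0 (min 24 pitch), p2.2)

-- ===== PORT B =====
def midi_note_to_noteblock_alt (midi_note : Int) : Int × Int :=
  let noteblock_base : Int := 54
  let (adjusted, octave_shift) :=
    if midi_note < noteblock_base then
      let k := PySem.Int.floordiv (noteblock_base - midi_note + 11) 12
      (midi_note + 12 * k, -k)
    else if midi_note > noteblock_base + 24 then
      let k := PySem.Int.floordiv (midi_note - (noteblock_base + 24) + 11) 12
      (midi_note - 12 * k, k)
    else (midi_note, 0)
  let pitch := adjusted - noteblock_base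
  (max 0 (min 24 pitch), octave_shift)

-- ===== PRECONDITION & SPEC =====
def Spec_midi_note_to_noteblock (midi_note : Int) (out : Int × Int) : Prop := out = midi_note_to_noteblock_alt midi_note
instance (midi_note : Int) (out : Int × Int) : Decidable (Spec_midi_note_to_noteblock midi_note out) := by unfold Spec_midi_note_to_noteblock; infer_instance

-- ===== CLAIM (what is proved, stated in full; the proofs are below) =====
def Claim_equal_midi_note_to_noteblock : Prop := ∀ (midi_note : Int), Dom_midi_note_to_noteblock midi_note → Spec_midi_note_to_noteblock midi_note (midi_note_to_noteblock midi_note)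

-- ===== LEMMAS AND PROOFS =====
lemma pvLoopUp_eq (a s : Int) :
    pvLoopUp a s = (a + 12 * max 0 ((65 - a) / 12), s - max 0 ((65 - a) / 12)) := by
  fun_induction pvLoopUp a s with
  | case1 a s h ih =>
      rw [ih]
      refine Prod.ext ?_ ?_ <;> simp only <;> omega
  | case2 a s h =>
      refine Prod.ext ?_ ?_ <;> simp only <;> omega

lemma pvLoopDown_eq (a s : Int) :
    pvLoopDown a s = (a - 12 * max 0 ((a - 67) / 12), s + max 0 ((a - 67) / 12)) := by
  fun_induction pvLoopDown a s with
  | case1 a s h ih =>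
      rw [ih]
      refine Prod.ext ?_ ?_ <;> simp only <;> omega
  | case2 a s h =>
      refine Prod.ext ?_ ?_ <;> simp only <;> omega

-- ===== VERDICT (by name: the statement is the Claim_ definition above) =====
theorem midi_note_to_noteblock_spec : Claim_equal_midi_note_to_noteblock := by
  intro n _
  show _ = _
  unfold midi_note_to_noteblock midi_note_to_noteblock_alt
  rw [pvLoopUp_eq]
  simp only
  rw [pvLoopDown_eq]
  rw [PySem.Int.floordiv_eq_ediv_of_pos (a := 54 - n + 11) (by norm_num),
      PySem.Int.floordiv_eq_ediv_of_pos (a := n - (54 + 24) + 11) (by norm_num)]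
  split_ifs with h1 h2 <;> refine Prod.ext ?_ ?_ <;> simp only <;> omega
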